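-- pv_equiv track=rewrite | github.com/falense/betterbeads | scripts/organize_permissions.py | sort_permissions
-- ===== SOURCE A (Python) =====
-- from collections import defaultdict
--
-- def categorize_permission(perm: str) -> str:
--     """Categorize a permission string into its type."""
--     if perm.startswith("mcp__"):
--         return "mcp"
--     elif perm.startswith("Bash("):
--         return "bash"
--     elif perm.startswith("Skill("):
--         return "skill"
--     elif perm.startswith("Read("):
--         return "read"
--     elif perm.startswith("Edit("):
--         return "edit"
--     elif perm.startswith("Write("):
--         return "write"
--     else:
--         return "other"
--
-- def sort_permissions(permissions: list[str]) -> list[str]: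
--     """Sort permissions by category, then alphabetically within each category."""
--     # Define category order
--     category_order = ["mcp", "bash", "skill", "read", "edit", "write", "other"]
--
--     # Group permissions by category
--     groups: dict[str, list[str]] = defaultdict(list)
--     for perm in permissions:
--         category = categorize_permission(perm)
--         groups[category].append(perm)
--
--     # Sort each group alphabetically (case-insensitive)
--     for category in groups:
--         groups[category].sort(key=str.lower)
--
--     # Combine in order, removing duplicates
--     result = []
--     seen = set()
--     for category in category_order:
--         for perm in groups[category]:
--             if perm not in seen:
--                 result.append(perm)
--                 seen.add(perm)
--
--     return result
-- ===== SOURCE B (Python) =====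
-- def categorize_permission(perm: str) -> str:
--     """Categorize a permission string into its type."""
--     if perm.startswith("mcp__"):
--         return "mcp"
--     elif perm.startswith("Bash("):
--         return "bash"
--     elif perm.startswith("Skill("):
--         return "skill"
--     elif perm.startswith("Read("):
--         return "read"
--     elif perm.startswith("Edit("):
--         return "edit"
--     elif perm.startswith("Write("):
--         return "write"
--     else:
--         return "other"
--
-- def sort_permissions(permissions: list[str]) -> list[str]:
--     """Single stable sort on a composite (category rank, lowercase) key, then ordered dedup."""
--     category_order = ["mcp", "bash", "skill", "read", "edit", "write", "other"]
--     rank = {c: i for i, c in enumerate(category_order)}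
--     ordered = sorted(permissions, key=lambda p: (rank[categorize_permission(p)], p.lower()))
--     return list(dict.fromkeys(ordered))
-- ===== Notes on version B (the rewrite author's own statement) =====
-- stated objective: alternative
-- what changed: Replaces A's group-into-defaultdict / per-group stable sort / concatenate-with-seen-set pipeline by one stable sort of the whole list on a composite (category rank, lowercase) key followed by an ordered dedup via dict.fromkeys.
import Mathlib
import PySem

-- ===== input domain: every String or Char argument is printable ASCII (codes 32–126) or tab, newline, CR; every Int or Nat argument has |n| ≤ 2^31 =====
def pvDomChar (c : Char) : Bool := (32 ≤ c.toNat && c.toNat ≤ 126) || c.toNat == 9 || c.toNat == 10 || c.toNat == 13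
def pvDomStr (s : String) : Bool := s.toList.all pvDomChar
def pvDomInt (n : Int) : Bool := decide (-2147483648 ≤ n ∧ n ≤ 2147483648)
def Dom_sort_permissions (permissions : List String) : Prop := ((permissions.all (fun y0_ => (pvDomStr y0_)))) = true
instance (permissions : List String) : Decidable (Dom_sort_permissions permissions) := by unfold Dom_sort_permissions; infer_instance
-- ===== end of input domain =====

-- B replaces A's group-into-dict / sort-each-group / concatenate-with-seen-set structure by ONE stable
-- composite-key sort pass followed by an ordered dedup (alternative decomposition, same cost class).

-- ===== PORT A =====
-- same-module helper, shared by both programs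
def categorize_permission (perm : String) : String :=
  if PySem.Str.startswith perm "mcp__" then "mcp"
  else if PySem.Str.startswith perm "Bash(" then "bash"
  else if PySem.Str.startswith perm "Skill(" then "skill"
  else if PySem.Str.startswith perm "Read(" then "read"
  else if PySem.Str.startswith perm "Edit(" then "edit"
  else if PySem.Str.startswith perm "Write(" then "write"
  else "other"

def sort_permissions (permissions : List String) : List String :=
  let category_order : List String := ["mcp", "bash", "skill", "read", "edit", "write", "other"]
  -- groups: dict[str, list[str]] built by appending each perm to its category's list
  let groups : PySem.Dict String (List String) :=
    permissions.foldl (fun d perm => d.modify (categorize_permission perm) [] (fun l => l ++ [perm])) PySem.Dict.empty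
  -- 'for category in groups: groups[category].sort(key=str.lower)' — in-place stable sort of each value
  let groups2 : PySem.Dict String (List String) :=
    groups.keys.foldl (fun d category => d.modify category [] (fun l => PySem.List.sorted l PySem.Str.lower false)) groups
  -- combine in category order, skipping perms already seen (defaultdict: a missing category reads as [])
  let rs : List String × PySem.Set String :=
    category_order.foldl (fun rs category =>
      (groups2.getD category []).foldl (fun rs perm =>
        if perm ∈ rs.2 then rs else (rs.1 ++ [perm], PySem.Set.add rs.2 perm)) rs) ([], PySem.Set.empty)
  rs.1

-- ===== PORT B =====
def sort_permissions_alt (permissions : List String) : List String :=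
  let category_order : List String := ["mcp", "bash", "skill", "read", "edit", "write", "other"]
  let rank : PySem.Dict String Int :=
    (PySem.List.enumerate category_order).foldl (fun d p => d.insert p.2 p.1) PySem.Dict.empty
  -- rank[categorize_permission(p)]: the key is always one of the seven names, so the lookup never raises
  let ordered := PySem.List.sorted2 permissions
    (fun p => (rank.get? (categorize_permission p)).getD 0) PySem.Str.lower false
  PySem.List.dedup ordered

-- ===== PRECONDITION & SPEC =====
def Spec_sort_permissions (permissions : List String) (out : List String) : Prop := out = sort_permissions_alt permissions
instance (permissions : List String) (out : List String) : Decidable (Spec_sort_permissions permissions out) := by unfold Spec_sort_permissions; infer_instance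

-- ===== CLAIM (what is proved, stated in full; the proofs are below) =====
def Claim_equal_sort_permissions : Prop := ∀ (permissions : List String), Dom_sort_permissions permissions → Spec_sort_permissions permissions (sort_permissions permissions)

-- ===== LEMMAS AND PROOFS =====

-- proof-side abbreviations for the shared constants
def pvCats : List String := ["mcp", "bash", "skill", "read", "edit", "write", "other"]
def pvRank : PySem.Dict String Int :=
  (PySem.List.enumerate pvCats).foldl (fun d p => d.insert p.2 p.1) PySem.Dict.empty
def pvK1 (p : String) : Int := (pvRank.get? (categorize_permission p)).getD 0
def pvRk (c : String) : Int := (pvRank.get? c).getD 0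
-- B's composite-key comparison (the 'before' predicate inside sorted2)
def pvB2 (a b : String) : Bool :=
  decide (pvK1 a < pvK1 b) || (!decide (pvK1 b < pvK1 a) && decide (PySem.Str.lower a < PySem.Str.lower b))
-- A's per-category sorted group, expressed as a filter
def pvG (c : String) (l : List String) : List String :=
  PySem.List.sorted (l.filter (fun p => categorize_permission p == c)) PySem.Str.lower false

theorem pvCat_mem (p : String) : categorize_permission p ∈ pvCats := by
  unfold categorize_permission pvCats
  split_ifs <;> simp

theorem pvK1_eq (p : String) : pvK1 p = pvRk (categorize_permission p) := rfl

-- insertBy facts specific to the bucket decomposition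
theorem pvInsertBy_append_none {α : Type} (before : α → α → Bool) (x : α) (s t : List α)
    (h : ∀ y ∈ s, before x y = false) :
    PySem.List.insertBy before x (s ++ t) = s ++ PySem.List.insertBy before x t := by
  induction s with
  | nil => rfl
  | cons a s ih =>
    have h1 := h a (by simp)
    have ih' := ih (fun y hy => h y (by simp [hy]))
    simp [List.cons_append, PySem.List.insertBy, h1, ih']

theorem pvInsertBy_append_all {α : Type} (before : α → α → Bool) (x : α) (s t : List α)
    (h : ∀ y ∈ t, before x y = true) :
    PySem.List.insertBy before x (s ++ t) = PySem.List.insertBy before x s ++ t := by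
  induction s with
  | nil =>
    cases t with
    | nil => rfl
    | cons b t => simp [PySem.List.insertBy, h b (by simp)]
  | cons a s ih =>
    by_cases hb : before x a = true
    · simp [PySem.List.insertBy, hb]
    · simp only [Bool.not_eq_true] at hb
      simp [List.cons_append, PySem.List.insertBy, hb, ih]

theorem pvInsertBy_congr {α : Type} (before before' : α → α → Bool) (x : α) (s : List α)
    (h : ∀ y ∈ s, before x y = before' x y) :
    PySem.List.insertBy before x s = PySem.List.insertBy before' x s := by
  induction s with
  | nil => rfl
  | cons a s ih =>
    simp only [PySem.List.insertBy, h a (by simp)]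
    simp only [ih (fun y hy => h y (by simp [hy]))]

-- ranks of categories that appear in pvCats are strictly increasing along pvCats
theorem pvCats_ranks : pvCats.Pairwise (fun a b => pvRk a < pvRk b) := by decide

-- === B side: the single composite-key sort splits into the per-category sorted filters ===

theorem pvSorted2_foldl (xs : List String) :
    PySem.List.sorted2 xs pvK1 PySem.Str.lower false
      = xs.foldl (fun acc x => PySem.List.insertBy pvB2 x acc) [] := rfl

theorem pvB2_of_lt {x y : String} (h : pvK1 x < pvK1 y) : pvB2 x y = true := by
  simp [pvB2, h]

theorem pvB2_of_gt {x y : String} (h : pvK1 y < pvK1 x) : pvB2 x y = false := by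
  simp [pvB2, h, lt_asymm h]

theorem pvB2_of_eq {x y : String} (h : pvK1 x = pvK1 y) :
    pvB2 x y = decide (PySem.Str.lower x < PySem.Str.lower y) := by
  simp [pvB2, h]

theorem pvInsert_flatMap (x : String) (S : String → List String) :
    ∀ (cs : List String), categorize_permission x ∈ cs →
    (∀ c ∈ cs, ∀ y ∈ S c, categorize_permission y = c) →
    cs.Pairwise (fun a b => pvRk a < pvRk b) →
    PySem.List.insertBy pvB2 x (cs.flatMap S)
      = cs.flatMap (fun c => if categorize_permission x = c then
          PySem.List.insertBy (fun a b => decide (PySem.Str.lower a < PySem.Str.lower b)) x (S c)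
        else S c) := by
  intro cs
  induction cs with
  | nil => intro hx _ _; simp at hx
  | cons c cs ih =>
    intro hx hS hcs
    rcases List.pairwise_cons.mp hcs with ⟨hlt, hcs'⟩
    by_cases hxc : categorize_permission x = c
    · have htail : ∀ y ∈ cs.flatMap S, pvB2 x y = true := by
        intro y hy
        rcases List.mem_flatMap.mp hy with ⟨c', hc', hyS⟩
        have hcy := hS c' (by simp [hc']) y hyS
        apply pvB2_of_lt
        rw [pvK1_eq, pvK1_eq, hxc, hcy]
        exact hlt c' hc'
      have hhead : PySem.List.insertBy pvB2 x (S c)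
          = PySem.List.insertBy (fun a b => decide (PySem.Str.lower a < PySem.Str.lower b)) x (S c) := by
        apply pvInsertBy_congr
        intro y hy
        exact pvB2_of_eq (by rw [pvK1_eq, pvK1_eq, hxc, hS c (by simp) y hy])
      rw [List.flatMap_cons, pvInsertBy_append_all _ _ _ _ htail, hhead,
          List.flatMap_cons, if_pos hxc]
      congr 1
      apply List.flatMap_congr
      intro c' hc'
      have hne : categorize_permission x ≠ c' := by
        intro he
        have h1 := hlt c' hc'
        rw [← hxc, he] at h1
        exact lt_irrefl _ h1
      rw [if_neg hne]
    · have hx' : categorize_permission x ∈ cs := by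
        rcases List.mem_cons.mp hx with h | h
        · exact absurd h hxc
        · exact h
      have hhead : ∀ y ∈ S c, pvB2 x y = false := by
        intro y hy
        apply pvB2_of_gt
        rw [pvK1_eq, pvK1_eq, hS c (by simp) y hy]
        exact hlt _ hx'
      rw [List.flatMap_cons, pvInsertBy_append_none _ _ _ _ hhead,
          ih hx' (fun c' hc' => hS c' (by simp [hc'])) hcs',
          List.flatMap_cons, if_neg hxc]

theorem pvSorted_append_singleton (ys : List String) (x : String) :
    PySem.List.sorted (ys ++ [x]) PySem.Str.lower false
      = PySem.List.insertBy (fun a b => decide (PySem.Str.lower a < PySem.Str.lower b)) x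
          (PySem.List.sorted ys PySem.Str.lower false) := by
  rw [PySem.List.sorted_eq_foldl_insertBy, PySem.List.sorted_eq_foldl_insertBy, List.foldl_append]
  simp

theorem pvSplit (l : List String) :
    PySem.List.sorted2 l pvK1 PySem.Str.lower false = pvCats.flatMap (fun c => pvG c l) := by
  induction l using List.reverseRecOn with
  | nil => decide
  | append_singleton l x ih =>
    rw [pvSorted2_foldl, List.foldl_append, List.foldl_cons, List.foldl_nil,
        ← pvSorted2_foldl, ih]
    have hS : ∀ c ∈ pvCats, ∀ y ∈ pvG c l, categorize_permission y = c := by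
      intro c _ y hy
      have hy' := (PySem.List.mem_sorted _ _ _ _).mp hy
      have := (List.mem_filter.mp hy').2
      simpa using this
    rw [pvInsert_flatMap x (fun c => pvG c l) pvCats (pvCat_mem x) hS pvCats_ranks]
    apply List.flatMap_congr
    intro c _
    by_cases hxc : categorize_permission x = c
    · have hfx : List.filter (fun p => categorize_permission p == c) [x] = [x] := by
        simp [hxc]
      rw [if_pos hxc]
      show _ = pvG c (l ++ [x])
      unfold pvG
      rw [List.filter_append, hfx, pvSorted_append_singleton]
    · have hfx : List.filter (fun p => categorize_permission p == c) [x] = [] := by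
        simp [hxc]
      rw [if_neg hxc]
      show pvG c l = pvG c (l ++ [x])
      unfold pvG
      rw [List.filter_append, hfx, List.append_nil]

-- === A side: the grouping dict reads back as filters ===

theorem pvGroups_getD_gen (l : List String) (c : String) :
    ∀ (d : PySem.Dict String (List String)),
    (l.foldl (fun d perm => d.modify (categorize_permission perm) [] (fun g => g ++ [perm])) d).getD c []
      = d.getD c [] ++ l.filter (fun p => categorize_permission p == c) := by
  induction l with
  | nil => simp
  | cons p l ih =>
    intro d
    simp only [List.foldl_cons, ih, PySem.Dict.getD_modify, List.filter_cons]
    by_cases hc : c = categorize_permission p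
    · simp only [if_pos hc]
      rw [hc]
      simp
    · have hbc : (categorize_permission p == c) = false := by
        simp only [beq_eq_false_iff_ne, ne_eq]
        exact fun h => hc h.symm
      simp only [if_neg hc, hbc, Bool.false_eq_true, reduceIte]

theorem pvGroups_getD (l : List String) (c : String) :
    (l.foldl (fun d perm => d.modify (categorize_permission perm) [] (fun g => g ++ [perm])) PySem.Dict.empty).getD c []
      = l.filter (fun p => categorize_permission p == c) := by
  rw [pvGroups_getD_gen l c PySem.Dict.empty]
  simp only [PySem.Dict.getD_empty, List.nil_append]

theorem pvSortLoop_getD (K : List String) (d : PySem.Dict String (List String)) (c : String) :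
    (K.foldl (fun d k => d.modify k [] (fun g => PySem.List.sorted g PySem.Str.lower false)) d).getD c []
      = if c ∈ K then PySem.List.sorted (d.getD c []) PySem.Str.lower false else d.getD c [] := by
  induction K generalizing d with
  | nil => simp
  | cons k K ih =>
    simp only [List.foldl_cons, ih, PySem.Dict.getD_modify, List.mem_cons]
    by_cases hck : c = k
    · by_cases hcK : c ∈ K <;>
        simp [hck, PySem.List.sorted_sorted]
    · by_cases hcK : c ∈ K <;> simp [hck, hcK]

-- === A side: the seen-set combine loop is an ordered dedup of the concatenation ===

theorem pvCombine_inner (l : List String) (s : PySem.Set String) :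
    l.foldl (fun rs p => if p ∈ rs.2 then rs else (rs.1 ++ [p], PySem.Set.add rs.2 p)) (s, s)
      = (l.foldl PySem.Set.add s, l.foldl PySem.Set.add s) := by
  induction l generalizing s with
  | nil => rfl
  | cons p l ih =>
    by_cases hp : p ∈ s
    · simpa [hp, PySem.Set.add_of_mem hp] using ih s
    · simpa [hp, PySem.Set.add_of_not_mem hp] using ih (PySem.Set.add s p)

theorem pvCombine (cats : List String) (G : String → List String) (s : PySem.Set String) :
    cats.foldl (fun rs c => (G c).foldl
        (fun rs p => if p ∈ rs.2 then rs else (rs.1 ++ [p], PySem.Set.add rs.2 p)) rs) (s, s)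
      = ((cats.flatMap G).foldl PySem.Set.add s, (cats.flatMap G).foldl PySem.Set.add s) := by
  induction cats generalizing s with
  | nil => rfl
  | cons c cats ih =>
    simp only [List.foldl_cons, List.flatMap_cons, List.foldl_append, pvCombine_inner]
    exact ih ((G c).foldl PySem.Set.add s)

-- the dict states of port A, named for the final assembly
def pvGrouping (l : List String) : PySem.Dict String (List String) :=
  l.foldl (fun d perm => d.modify (categorize_permission perm) [] (fun g => g ++ [perm])) PySem.Dict.empty

def pvGroups2 (l : List String) : PySem.Dict String (List String) :=
  (pvGrouping l).keys.foldl
    (fun d category => d.modify category [] (fun g => PySem.List.sorted g PySem.Str.lower false)) (pvGrouping l)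

theorem pvGroups2_getD (l : List String) (c : String) : (pvGroups2 l).getD c [] = pvG c l := by
  unfold pvGroups2
  rw [pvSortLoop_getD]
  by_cases hc : c ∈ (pvGrouping l).keys
  · rw [if_pos hc]
    unfold pvGrouping pvG
    rw [pvGroups_getD]
  · rw [if_neg hc]
    have hcont : (pvGrouping l).contains c = false := by
      cases h : (pvGrouping l).contains c
      · rfl
      · exact absurd ((PySem.Dict.contains_iff_mem_keys _ _).mp h) hc
    have hnil : (pvGrouping l).getD c [] = [] := PySem.Dict.getD_of_not_contains _ _ hcont
    have hfil : l.filter (fun p => categorize_permission p == c) = [] := by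
      rw [← pvGroups_getD l c]
      exact hnil
    unfold pvG
    rw [hfil, hnil]
    rfl

-- ===== VERDICT (by name: the statement is the Claim_ definition above) =====
theorem sort_permissions_spec : Claim_equal_sort_permissions := by
  intro permissions _
  show sort_permissions permissions = sort_permissions_alt permissions
  have hB : sort_permissions_alt permissions
      = PySem.Set.ofList (pvCats.flatMap (fun c => pvG c permissions)) := by
    show PySem.List.dedup (PySem.List.sorted2 permissions pvK1 PySem.Str.lower false) = _
    rw [PySem.List.dedup_eq_ofList, pvSplit]
  have hA : sort_permissions permissions
      = PySem.Set.ofList (pvCats.flatMap (fun c => pvG c permissions)) := by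
    show (pvCats.foldl (fun rs category =>
        ((pvGroups2 permissions).getD category []).foldl
          (fun rs perm => if perm ∈ rs.2 then rs else (rs.1 ++ [perm], PySem.Set.add rs.2 perm)) rs)
        (([] : List String), ([] : PySem.Set String))).1 = _
    rw [pvCombine pvCats (fun c => (pvGroups2 permissions).getD c []) []]
    have hmaps : pvCats.flatMap (fun c => (pvGroups2 permissions).getD c [])
        = pvCats.flatMap (fun c => pvG c permissions) :=
      List.flatMap_congr (fun c _ => pvGroups2_getD permissions c)
    rw [hmaps]
    rfl
  rw [hA, hB]
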